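-- pv_equiv track=rewrite | github.com/KumudaSG/ai-rtl-verifier | Phase_2/verifier.py | group_failed_checks
-- ===== SOURCE A (Python) =====
-- from typing import List, Optional, Dict, Any
--
-- def should_ignore_check(check_name: str) -> bool:
--     return check_name.startswith("manual_fail")
--
-- def group_failed_checks(checks: Dict[str, bool]) -> Dict[str, List[str]]:
--     grouped = {}
--
--     for check_name, passed in checks.items():
--         if passed or should_ignore_check(check_name):
--             continue
--
--         if check_name == "reached_end_of_testbench":
--             grouped.setdefault("framework", []).append("testbench did not finish cleanly")
--             continue
--
--         if check_name.endswith("_done"):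
--             test_name = check_name[:-5]
--             grouped.setdefault("done", []).append(test_name)
--
--         elif check_name.endswith("_result"):
--             test_name = check_name[:-7]
--             grouped.setdefault("result", []).append(test_name)
--
--         elif check_name.endswith("_overflow"):
--             test_name = check_name[:-9]
--             grouped.setdefault("overflow", []).append(test_name)
--
--         elif check_name.endswith("_full"):
--             test_name = check_name[:-5]
--             grouped.setdefault("full", []).append(test_name)
--
--         elif check_name.endswith("_empty"):
--             test_name = check_name[:-6]
--             grouped.setdefault("empty", []).append(test_name)
--
--         elif check_name.endswith("_data"):
--             test_name = check_name[:-5]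
--             grouped.setdefault("data", []).append(test_name)
--
--         elif check_name.endswith("_valid"):
--             test_name = check_name[:-6]
--             grouped.setdefault("valid", []).append(test_name)
--
--         elif check_name.endswith("_busy"):
--             test_name = check_name[:-5]
--             grouped.setdefault("busy", []).append(test_name)
--
--         else:
--             grouped.setdefault("other", []).append(check_name)
--
--     return grouped
-- ===== SOURCE B (Python) =====
-- _CATEGORIES = frozenset(
--     ["done", "result", "overflow", "full", "empty", "data", "valid", "busy"])
--
--
-- def group_failed_checks(checks):
--     # Stage 1: classify each relevant failing check into a (category, payload) pair.
--     pairs = []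
--     for name, passed in checks.items():
--         if passed or name.startswith("manual_fail"):
--             continue
--         if name == "reached_end_of_testbench":
--             pairs.append(("framework", "testbench did not finish cleanly"))
--             continue
--         cut = name.rfind("_")
--         tail = name[cut + 1:]
--         if cut != -1 and tail in _CATEGORIES:
--             pairs.append((tail, name[:cut]))
--         else:
--             pairs.append(("other", name))
--     # Stage 2: group the pairs by category, in order of first appearance.
--     order = list(dict.fromkeys(cat for cat, _ in pairs))
--     return {cat: [p for c, p in pairs if c == cat] for cat in order}
-- ===== Notes on version B (the rewrite author's own statement) =====
-- stated objective: alternative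
-- what changed: B replaces A's single pass with a setdefault-dict and an eight-branch endswith elif chain by two stages: it first classifies each failing check into a (category, payload) pair by splitting the name at its LAST underscore (rfind) and looking the tail up in a category set, then groups the pair list by category in first-appearance order with a dedup pass and per-category gathering.
import Mathlib
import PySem

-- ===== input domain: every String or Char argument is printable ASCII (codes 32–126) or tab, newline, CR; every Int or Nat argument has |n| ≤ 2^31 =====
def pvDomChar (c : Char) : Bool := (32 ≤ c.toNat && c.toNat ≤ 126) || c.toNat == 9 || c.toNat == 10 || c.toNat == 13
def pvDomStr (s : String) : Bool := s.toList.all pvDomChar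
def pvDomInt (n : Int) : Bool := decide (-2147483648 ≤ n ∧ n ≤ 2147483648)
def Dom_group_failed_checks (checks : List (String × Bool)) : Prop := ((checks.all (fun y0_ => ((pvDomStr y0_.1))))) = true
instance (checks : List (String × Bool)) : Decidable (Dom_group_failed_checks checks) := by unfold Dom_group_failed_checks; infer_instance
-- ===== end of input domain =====

-- B replaces A's single setdefault-dict pass with an eight-branch endswith chain by two
-- stages: classify each failing check by splitting at the LAST underscore (rfind) and
-- looking the tail up in a category set, then group the pairs by first-appearance order
-- (objective: alternative); return values proved equal.

-- ===== PORT A =====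
def should_ignore_check (check_name : String) : Bool :=
  PySem.Str.startswith check_name "manual_fail"

def pvStepA (grouped : PySem.Dict String (List String)) (p : String × Bool) :
    PySem.Dict String (List String) :=
  let check_name := p.1
  if p.2 || should_ignore_check check_name then grouped
  else if check_name == "reached_end_of_testbench" then
    grouped.modify "framework" [] (· ++ ["testbench did not finish cleanly"])
  else if PySem.Str.endswith check_name "_done" then
    grouped.modify "done" [] (· ++ [PySem.Str.slice check_name none (some (-5))])
  else if PySem.Str.endswith check_name "_result" then
    grouped.modify "result" [] (· ++ [PySem.Str.slice check_name none (some (-7))])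
  else if PySem.Str.endswith check_name "_overflow" then
    grouped.modify "overflow" [] (· ++ [PySem.Str.slice check_name none (some (-9))])
  else if PySem.Str.endswith check_name "_full" then
    grouped.modify "full" [] (· ++ [PySem.Str.slice check_name none (some (-5))])
  else if PySem.Str.endswith check_name "_empty" then
    grouped.modify "empty" [] (· ++ [PySem.Str.slice check_name none (some (-6))])
  else if PySem.Str.endswith check_name "_data" then
    grouped.modify "data" [] (· ++ [PySem.Str.slice check_name none (some (-5))])
  else if PySem.Str.endswith check_name "_valid" then
    grouped.modify "valid" [] (· ++ [PySem.Str.slice check_name none (some (-6))])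
  else if PySem.Str.endswith check_name "_busy" then
    grouped.modify "busy" [] (· ++ [PySem.Str.slice check_name none (some (-5))])
  else
    grouped.modify "other" [] (· ++ [check_name])

def group_failed_checks (checks : List (String × Bool)) : List (String × List String) :=
  (checks.foldl pvStepA PySem.Dict.empty).items

-- ===== PORT B =====
def pvCategories : PySem.Set String :=
  PySem.Set.ofList ["done", "result", "overflow", "full", "empty", "data", "valid", "busy"]

def pvClassify (name : String) : String × String :=
  if name == "reached_end_of_testbench" then ("framework", "testbench did not finish cleanly")
  else
    let cut := PySem.Str.rfind name "_"
    let tail := PySem.Str.slice name (some (cut + 1)) none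
    if cut != -1 && PySem.Set.contains pvCategories tail then
      (tail, PySem.Str.slice name none (some cut))
    else ("other", name)

def pvStepB (pairs : List (String × String)) (p : String × Bool) : List (String × String) :=
  if p.2 || PySem.Str.startswith p.1 "manual_fail" then pairs
  else pairs ++ [pvClassify p.1]

def group_failed_checks_alt (checks : List (String × Bool)) : List (String × List String) :=
  let pairs := checks.foldl pvStepB []
  let order := PySem.List.dedup (pairs.map (·.1))
  order.map (fun cat => (cat, (pairs.filter (fun q => q.1 == cat)).map (·.2)))

-- ===== PRECONDITION & SPEC =====
def Spec_group_failed_checks (checks : List (String × Bool)) (out : List (String × List String)) : Prop := out = group_failed_checks_alt checks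
instance (checks : List (String × Bool)) (out : List (String × List String)) : Decidable (Spec_group_failed_checks checks out) := by unfold Spec_group_failed_checks; infer_instance

-- ===== CLAIM (what is proved, stated in full; the proofs are below) =====
def Claim_equal_group_failed_checks : Prop := ∀ (checks : List (String × Bool)), Dom_group_failed_checks checks → Spec_group_failed_checks checks (group_failed_checks checks)

-- ===== LEMMAS AND PROOFS =====

-- [c] is a prefix of a list iff its first element is c
lemma pv_isPrefix_single (s : List Char) (c : Char) (i : Nat) :
    [c].isPrefixOf (s.drop i) = (s[i]? == some c) := by
  have hget : s[i]? = (s.drop i)[0]? := by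
    rw [List.getElem?_drop]; simp
  cases h : s.drop i with
  | nil => simp [List.isPrefixOf, hget, h]
  | cons x t =>
    simp only [hget, h, List.getElem?_cons_zero]
    by_cases hc : c = x
    · subst hc; simp
    · simp [List.isPrefixOf, hc, Ne.symm hc]

-- spec of PySem.Chars.rfind.go for a single-character needle
lemma pv_rfind_go_cases (s : List Char) (c : Char) (j : Nat) :
    (PySem.Chars.rfind.go s [c] j = -1 ∧ ∀ i : Nat, i ≤ j → s[i]? ≠ some c) ∨
    (∃ i : Nat, i ≤ j ∧ s[i]? = some c ∧ PySem.Chars.rfind.go s [c] j = (i : Int) ∧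
      ∀ i' : Nat, i < i' → i' ≤ j → s[i']? ≠ some c) := by
  induction j with
  | zero =>
    have h0 : [c].isPrefixOf (s.drop 0) = (s[0]? == some c) := pv_isPrefix_single s c 0
    simp only [List.drop_zero] at h0
    by_cases hc : s[0]? = some c
    · right
      exact ⟨0, le_refl 0, hc, by show (if [c].isPrefixOf s then _ else _) = _; simp [h0, hc],
        fun i' h1 h2 => absurd (Nat.lt_of_lt_of_le h1 h2) (lt_irrefl 0)⟩
    · left
      refine ⟨by show (if [c].isPrefixOf s then _ else _) = _; simp [h0, hc], ?_⟩
      intro i hi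
      interval_cases i
      exact hc
  | succ j ih =>
    have hstep : PySem.Chars.rfind.go s [c] (j+1)
        = if [c].isPrefixOf (s.drop (j+1)) then ((j+1 : Nat) : Int)
          else PySem.Chars.rfind.go s [c] j := rfl
    have hpf : [c].isPrefixOf (s.drop (j+1)) = (s[j+1]? == some c) := pv_isPrefix_single s c (j+1)
    by_cases hc : s[j+1]? = some c
    · right
      refine ⟨j+1, le_refl _, hc, by rw [hstep, hpf]; simp [hc], ?_⟩
      intro i' h1 h2
      exact absurd (Nat.lt_of_lt_of_le h1 h2) (lt_irrefl _)
    · have hgo : PySem.Chars.rfind.go s [c] (j+1) = PySem.Chars.rfind.go s [c] j := by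
        rw [hstep, hpf]; simp [hc]
      rcases ih with ⟨h1, h2⟩ | ⟨i, hle, hi, heq, hmax⟩
      · left
        refine ⟨hgo.trans h1, ?_⟩
        intro i hij
        rcases Nat.lt_or_ge i (j+1) with h | h
        · exact h2 i (Nat.lt_succ_iff.mp h)
        · have : i = j+1 := le_antisymm hij h
          subst this; exact hc
      · right
        refine ⟨i, Nat.le_succ_of_le hle, hi, hgo.trans heq, ?_⟩
        intro i' h1' h2'
        rcases Nat.lt_or_ge i' (j+1) with h | h
        · exact hmax i' h1' (Nat.lt_succ_iff.mp h)
        · have : i' = j+1 := le_antisymm h2' h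
          subst this; exact hc

-- rfind of a single character: either absent, or the last-occurrence decomposition
lemma pv_rfind_cases (s : List Char) (c : Char) :
    (PySem.Chars.rfind s [c] = -1 ∧ c ∉ s) ∨
    (∃ pre tail : List Char, s = pre ++ c :: tail ∧ c ∉ tail ∧
      PySem.Chars.rfind s [c] = (pre.length : Int)) := by
  have hr : PySem.Chars.rfind s [c] = PySem.Chars.rfind.go s [c] s.length := rfl
  rcases pv_rfind_go_cases s c s.length with ⟨h1, h2⟩ | ⟨i, hle, hi, heq, hmax⟩
  · left
    refine ⟨hr.trans h1, ?_⟩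
    intro hmem
    obtain ⟨k, hk, hget⟩ := List.getElem_of_mem hmem
    exact h2 k (le_of_lt hk) (by simp [List.getElem?_eq_getElem hk, hget])
  · right
    have hilt : i < s.length := by
      by_contra h
      rw [List.getElem?_eq_none (le_of_not_gt h)] at hi
      simp at hi
    refine ⟨s.take i, s.drop (i+1), ?_, ?_, ?_⟩
    · have : s[i] = c := by
        have := List.getElem?_eq_getElem hilt
        rw [this] at hi; exact Option.some.inj hi
      conv_lhs => rw [← List.take_append_drop i s]
      rw [List.drop_eq_getElem_cons hilt, this]
    · intro hmem
      obtain ⟨k, hk, hget⟩ := List.getElem_of_mem hmem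
      have hlen : i + 1 + k < s.length := by
        have := (List.length_drop (l := s) (i := i+1)) ▸ hk
        omega
      refine hmax (i+1+k) (by omega) (le_of_lt hlen) ?_
      rw [List.getElem?_eq_getElem hlen]
      rw [← hget, List.getElem_drop]
    · rw [hr, heq]
      congr 1
      simp [List.length_take]
      omega

-- a suffix of the form c::w, with c missing from w and tail, pins w = tail
lemma pv_suffix_decomp (pre tail w : List Char) (c : Char) (ht : c ∉ tail) (hw : c ∉ w) :
    ((c :: w) <:+ (pre ++ c :: tail)) ↔ w = tail := by
  constructor
  · intro h
    rw [← List.reverse_prefix] at h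
    simp only [List.reverse_append, List.reverse_cons] at h
    -- h : w.reverse ++ [c] <+: (tail.reverse ++ [c]) ++ pre.reverse
    have hvpre : tail.reverse ++ [c] <+: (tail.reverse ++ [c]) ++ pre.reverse :=
      List.prefix_append _ _
    have hwhole : w.reverse ++ [c] <+: (tail.reverse ++ [c]) ++ pre.reverse := by
      simpa using h
    by_cases hlt : w.length < tail.length
    · exfalso
      have hsub : w.reverse ++ [c] <+: tail.reverse ++ [c] :=
        List.prefix_of_prefix_length_le hwhole hvpre (by simp; omega)
      have : w.reverse ++ [c] <+: tail.reverse :=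
        List.prefix_of_prefix_length_le hsub (List.prefix_append _ _) (by simp; omega)
      have : c ∈ tail.reverse := this.subset (by simp)
      simp at this; exact ht this
    · by_cases hgt : tail.length < w.length
      · exfalso
        have hsub : tail.reverse ++ [c] <+: w.reverse ++ [c] :=
          List.prefix_of_prefix_length_le hvpre hwhole (by simp; omega)
        have : tail.reverse ++ [c] <+: w.reverse :=
          List.prefix_of_prefix_length_le hsub (List.prefix_append _ _) (by simp; omega)
        have : c ∈ w.reverse := this.subset (by simp)
        simp at this; exact hw this
      · have heq : w.length = tail.length := by omega
        have h1 : w.reverse ++ [c] <+: tail.reverse ++ [c] :=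
          List.prefix_of_prefix_length_le hwhole hvpre (by simp [heq])
        have h2 := h1.eq_of_length (by simp [heq])
        have := List.append_cancel_right h2
        have := List.reverse_injective this
        simpa using this
  · rintro rfl
    exact ⟨pre, rfl⟩

-- the tail slice name[cut+1:] reads off the decomposition
lemma pv_slice_from (name : String) (pre tail : List Char) (c : Char)
    (h : name.toList = pre ++ c :: tail) :
    (PySem.Str.slice name (some ((pre.length : Int) + 1)) none).toList = tail := by
  have : ((pre.length : Int) + 1) = ((pre.length + 1 : Nat) : Int) := by push_cast; ring
  rw [PySem.Str.toList_slice, PySem.Chars.slice_eq_listSlice, this,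
    PySem.List.slice_from_natCast, h]
  simp [List.drop_append]

-- the payload slice name[:cut] reads off the decomposition
lemma pv_slice_to (name : String) (pre tail : List Char) (c : Char)
    (h : name.toList = pre ++ c :: tail) :
    (PySem.Str.slice name none (some (pre.length : Int))).toList = pre := by
  rw [PySem.Str.toList_slice, PySem.Chars.slice_eq_listSlice,
    PySem.List.slice_to_natCast, h]
  simp

-- the payload slice name[:-k] with k = len(tail)+1 also yields pre
lemma pv_slice_neg (name : String) (pre tail : List Char) (c : Char)
    (h : name.toList = pre ++ c :: tail) (k : Nat) (hk : k = tail.length + 1) (h0 : 0 < k) :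
    (PySem.Str.slice name none (some (-(k : Int)))).toList = pre := by
  rw [PySem.Str.toList_slice, PySem.Chars.slice_eq_listSlice,
    PySem.List.slice_to_neg_natCast _ _ h0, h]
  have : (pre ++ c :: tail).length - k = pre.length := by simp; omega
  rw [this]
  simp

-- endswith('_'+w) on a name whose last underscore splits it as pre ++ '_' :: tail
lemma pv_endswith (name : String) (pre tail : List Char) (ht : '_' ∉ tail)
    (h : name.toList = pre ++ '_' :: tail) (sfx : String) (w : List Char)
    (hsfx : sfx.toList = '_' :: w) (hw : '_' ∉ w) :
    PySem.Str.endswith name sfx = decide (w = tail) := by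
  rw [PySem.Str.endswith_eq, hsfx, h]
  by_cases hwt : w = tail
  · subst hwt
    have hsuf : PySem.Chars.endswith (pre ++ '_' :: w) ('_' :: w) = true :=
      (PySem.Chars.endswith_iff _ _).mpr ⟨pre, rfl⟩
    simp [hsuf]
  · simp [hwt]
    rw [← Bool.not_eq_true, PySem.Chars.endswith_iff]
    exact fun hs => hwt ((pv_suffix_decomp pre tail w '_' ht hw).mp hs)

-- endswith('_'+w) is false when the name has no underscore at all
lemma pv_endswith_none (name : String) (sfx : String) (w : List Char)
    (hsfx : sfx.toList = '_' :: w) (hmem : '_' ∉ name.toList) :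
    PySem.Str.endswith name sfx = false := by
  rw [PySem.Str.endswith_eq, hsfx, ← Bool.not_eq_true, PySem.Chars.endswith_iff]
  exact fun hs => hmem (hs.subset (by simp))

-- A's per-item update equals B's classification followed by one modify
lemma pv_stepA_eq (g : PySem.Dict String (List String)) (name : String) (b : Bool) :
    pvStepA g (name, b) =
      if b || PySem.Str.startswith name "manual_fail" then g
      else g.modify (pvClassify name).1 [] (· ++ [(pvClassify name).2]) := by
  cases b with
  | true => simp [pvStepA]
  | false =>
    simp only [pvStepA, should_ignore_check, Bool.false_or]
    by_cases hig : PySem.Str.startswith name "manual_fail"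
    · simp at hig; simp [hig]
    · simp only [hig, Bool.false_eq_true, if_false]
      by_cases hre : name = "reached_end_of_testbench"
      · subst hre; simp [pvClassify]
      · have hbe : (name == "reached_end_of_testbench") = false := beq_eq_false_iff_ne.mpr hre
        simp only [hbe, Bool.false_eq_true, if_false]
        rcases pv_rfind_cases name.toList '_' with ⟨hrf, hmem⟩ | ⟨pre, tail, hdec, htail, hrf⟩
        · -- no underscore in the name: every suffix test fails, B's cut is -1
          have e1 := pv_endswith_none name "_done" "done".toList rfl hmem
          have e2 := pv_endswith_none name "_result" "result".toList rfl hmem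
          have e3 := pv_endswith_none name "_overflow" "overflow".toList rfl hmem
          have e4 := pv_endswith_none name "_full" "full".toList rfl hmem
          have e5 := pv_endswith_none name "_empty" "empty".toList rfl hmem
          have e6 := pv_endswith_none name "_data" "data".toList rfl hmem
          have e7 := pv_endswith_none name "_valid" "valid".toList rfl hmem
          have e8 := pv_endswith_none name "_busy" "busy".toList rfl hmem
          simp at e1 e2 e3 e4 e5 e6 e7 e8
          simp [pvClassify, hbe, hrf, e1, e2, e3, e4, e5, e6, e7, e8]
        · -- name = pre ++ '_' :: tail with no underscore in tail
          have htl : (PySem.Str.slice name (some ((pre.length : Int) + 1)) none).toList = tail :=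
            pv_slice_from name pre tail '_' hdec
          have hpay : (PySem.Str.slice name none (some (pre.length : Int))).toList = pre :=
            pv_slice_to name pre tail '_' hdec
          have e1 := pv_endswith name pre tail htail hdec "_done" "done".toList rfl (by decide)
          have e2 := pv_endswith name pre tail htail hdec "_result" "result".toList rfl (by decide)
          have e3 := pv_endswith name pre tail htail hdec "_overflow" "overflow".toList rfl (by decide)
          have e4 := pv_endswith name pre tail htail hdec "_full" "full".toList rfl (by decide)
          have e5 := pv_endswith name pre tail htail hdec "_empty" "empty".toList rfl (by decide)
          have e6 := pv_endswith name pre tail htail hdec "_data" "data".toList rfl (by decide)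
          have e7 := pv_endswith name pre tail htail hdec "_valid" "valid".toList rfl (by decide)
          have e8 := pv_endswith name pre tail htail hdec "_busy" "busy".toList rfl (by decide)
          have hne' : ¬ ((pre.length : Int) = -1) := by omega
          simp at e1 e2 e3 e4 e5 e6 e7 e8
          by_cases h1 : tail = "done".toList
          · have hts : PySem.Str.slice name (some ((pre.length : Int) + 1)) none = "done" :=
              String.toList_inj.mp (htl.trans h1)
            have hp : (PySem.Str.slice name none (some (-5 : Int))).toList = pre := by
              simpa using pv_slice_neg name pre tail '_' hdec 5 (by rw [h1]; rfl) (by omega)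
            have hpe : PySem.Str.slice name none (some (-5 : Int))
                = PySem.Str.slice name none (some (pre.length : Int)) :=
              String.toList_inj.mp (hp.trans hpay.symm)
            have hmemc : ("done" : String) ∈ pvCategories := by decide
            simp [pvClassify, hbe, hrf, e1, h1, hts, hpe, hne', hmemc]
          by_cases h2 : tail = "result".toList
          · have hts : PySem.Str.slice name (some ((pre.length : Int) + 1)) none = "result" :=
              String.toList_inj.mp (htl.trans h2)
            have hp : (PySem.Str.slice name none (some (-7 : Int))).toList = pre := by
              simpa using pv_slice_neg name pre tail '_' hdec 7 (by rw [h2]; rfl) (by omega)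
            have hpe : PySem.Str.slice name none (some (-7 : Int))
                = PySem.Str.slice name none (some (pre.length : Int)) :=
              String.toList_inj.mp (hp.trans hpay.symm)
            have hmemc : ("result" : String) ∈ pvCategories := by decide
            simp [pvClassify, hbe, hrf, e1, e2, h2, hts, hpe, hne', hmemc]
          by_cases h3 : tail = "overflow".toList
          · have hts : PySem.Str.slice name (some ((pre.length : Int) + 1)) none = "overflow" :=
              String.toList_inj.mp (htl.trans h3)
            have hp : (PySem.Str.slice name none (some (-9 : Int))).toList = pre := by
              simpa using pv_slice_neg name pre tail '_' hdec 9 (by rw [h3]; rfl) (by omega)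
            have hpe : PySem.Str.slice name none (some (-9 : Int))
                = PySem.Str.slice name none (some (pre.length : Int)) :=
              String.toList_inj.mp (hp.trans hpay.symm)
            have hmemc : ("overflow" : String) ∈ pvCategories := by decide
            simp [pvClassify, hbe, hrf, e1, e2, e3, h3, hts, hpe, hne', hmemc]
          by_cases h4 : tail = "full".toList
          · have hts : PySem.Str.slice name (some ((pre.length : Int) + 1)) none = "full" :=
              String.toList_inj.mp (htl.trans h4)
            have hp : (PySem.Str.slice name none (some (-5 : Int))).toList = pre := by
              simpa using pv_slice_neg name pre tail '_' hdec 5 (by rw [h4]; rfl) (by omega)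
            have hpe : PySem.Str.slice name none (some (-5 : Int))
                = PySem.Str.slice name none (some (pre.length : Int)) :=
              String.toList_inj.mp (hp.trans hpay.symm)
            have hmemc : ("full" : String) ∈ pvCategories := by decide
            simp [pvClassify, hbe, hrf, e1, e2, e3, e4, h4, hts, hpe, hne', hmemc]
          by_cases h5 : tail = "empty".toList
          · have hts : PySem.Str.slice name (some ((pre.length : Int) + 1)) none = "empty" :=
              String.toList_inj.mp (htl.trans h5)
            have hp : (PySem.Str.slice name none (some (-6 : Int))).toList = pre := by
              simpa using pv_slice_neg name pre tail '_' hdec 6 (by rw [h5]; rfl) (by omega)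
            have hpe : PySem.Str.slice name none (some (-6 : Int))
                = PySem.Str.slice name none (some (pre.length : Int)) :=
              String.toList_inj.mp (hp.trans hpay.symm)
            have hmemc : ("empty" : String) ∈ pvCategories := by decide
            simp [pvClassify, hbe, hrf, e1, e2, e3, e4, e5, h5, hts, hpe, hne', hmemc]
          by_cases h6 : tail = "data".toList
          · have hts : PySem.Str.slice name (some ((pre.length : Int) + 1)) none = "data" :=
              String.toList_inj.mp (htl.trans h6)
            have hp : (PySem.Str.slice name none (some (-5 : Int))).toList = pre := by
              simpa using pv_slice_neg name pre tail '_' hdec 5 (by rw [h6]; rfl) (by omega)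
            have hpe : PySem.Str.slice name none (some (-5 : Int))
                = PySem.Str.slice name none (some (pre.length : Int)) :=
              String.toList_inj.mp (hp.trans hpay.symm)
            have hmemc : ("data" : String) ∈ pvCategories := by decide
            simp [pvClassify, hbe, hrf, e1, e2, e3, e4, e5, e6, h6, hts, hpe, hne', hmemc]
          by_cases h7 : tail = "valid".toList
          · have hts : PySem.Str.slice name (some ((pre.length : Int) + 1)) none = "valid" :=
              String.toList_inj.mp (htl.trans h7)
            have hp : (PySem.Str.slice name none (some (-6 : Int))).toList = pre := by
              simpa using pv_slice_neg name pre tail '_' hdec 6 (by rw [h7]; rfl) (by omega)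
            have hpe : PySem.Str.slice name none (some (-6 : Int))
                = PySem.Str.slice name none (some (pre.length : Int)) :=
              String.toList_inj.mp (hp.trans hpay.symm)
            have hmemc : ("valid" : String) ∈ pvCategories := by decide
            simp [pvClassify, hbe, hrf, e1, e2, e3, e4, e5, e6, e7, h7, hts, hpe, hne', hmemc]
          by_cases h8 : tail = "busy".toList
          · have hts : PySem.Str.slice name (some ((pre.length : Int) + 1)) none = "busy" :=
              String.toList_inj.mp (htl.trans h8)
            have hp : (PySem.Str.slice name none (some (-5 : Int))).toList = pre := by
              simpa using pv_slice_neg name pre tail '_' hdec 5 (by rw [h8]; rfl) (by omega)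
            have hpe : PySem.Str.slice name none (some (-5 : Int))
                = PySem.Str.slice name none (some (pre.length : Int)) :=
              String.toList_inj.mp (hp.trans hpay.symm)
            have hmemc : ("busy" : String) ∈ pvCategories := by decide
            simp [pvClassify, hbe, hrf, e1, e2, e3, e4, e5, e6, e7, e8, h8, hts, hpe, hne', hmemc]
          · -- tail matches none of the eight categories
            have hnotin : PySem.Str.slice name (some ((pre.length : Int) + 1)) none ∉ pvCategories := by
              intro hmemx
              simp [pvCategories, PySem.Set.mem_ofList] at hmemx
              rcases hmemx with h | h | h | h | h | h | h | h
              · exact h1 (by rw [← htl, h])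
              · exact h2 (by rw [← htl, h])
              · exact h3 (by rw [← htl, h])
              · exact h4 (by rw [← htl, h])
              · exact h5 (by rw [← htl, h])
              · exact h6 (by rw [← htl, h])
              · exact h7 (by rw [← htl, h])
              · exact h8 (by rw [← htl, h])
            simp at h1 h2 h3 h4 h5 h6 h7 h8
            simp [pvClassify, hbe, hrf, e1, e2, e3, e4, e5, e6, e7, e8, hnotin,
              Ne.symm h1, Ne.symm h2, Ne.symm h3, Ne.symm h4, Ne.symm h5, Ne.symm h6,
              Ne.symm h7, Ne.symm h8]

-- fuse A's fold into a fold of modifies over B's classified pair list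
lemma pv_fold_fusion (checks : List (String × Bool)) (d : PySem.Dict String (List String)) :
    checks.foldl pvStepA d =
      (checks.foldl pvStepB []).foldl (fun d q => d.modify q.1 [] (· ++ [q.2])) d := by
  induction checks generalizing d with
  | nil => rfl
  | cons p cs ih =>
    have hclosed : ∀ init : List (String × String), cs.foldl pvStepB init
        = init ++ (cs.filter (fun q => !(q.2 || PySem.Str.startswith q.1 "manual_fail"))).map
            (fun q => pvClassify q.1) := by
      intro init
      have hB : pvStepB = fun acc x =>
          if !(x.2 || PySem.Str.startswith x.1 "manual_fail") then acc ++ [pvClassify x.1]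
          else acc := by
        funext acc x
        simp only [pvStepB]
        cases x.2 || PySem.Str.startswith x.1 "manual_fail" <;> simp
      rw [hB, PySem.List.foldl_append_if]
    obtain ⟨name, b⟩ := p
    have hinit : pvStepA d (name, b)
        = (pvStepB [] (name, b)).foldl (fun d q => d.modify q.1 [] (· ++ [q.2])) d := by
      have hstep : pvStepB [] (name, b)
          = if (b || PySem.Str.startswith name "manual_fail") then [] else [pvClassify name] := rfl
      rw [pv_stepA_eq, hstep]
      cases (b || PySem.Str.startswith name "manual_fail") <;> rfl
    simp only [List.foldl_cons]
    rw [ih, hinit, hclosed (pvStepB [] (name, b)), List.foldl_append, hclosed [],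
      List.nil_append]

-- ===== VERDICT (by name: the statement is the Claim_ definition above) =====
theorem group_failed_checks_spec : Claim_equal_group_failed_checks := by
  intro checks _
  show _ = _
  unfold group_failed_checks group_failed_checks_alt
  rw [pv_fold_fusion]
  set pairs := checks.foldl pvStepB [] with hpairs
  have hnd : ((pairs.foldl (fun d q => d.modify q.1 [] (· ++ [q.2])) PySem.Dict.empty)).keys.Nodup := by
    have := PySem.Dict.nodup_keys_foldl_modify_key pairs (·.1) []
      (fun _ q => (· ++ [q.2])) PySem.Dict.empty (by simp [PySem.Dict.keys_empty])
    simpa using this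
  rw [PySem.Dict.items_eq_map_keys _ hnd []]
  have hkeys : ((pairs.foldl (fun d q => d.modify q.1 [] (· ++ [q.2])) PySem.Dict.empty)).keys
      = PySem.List.dedup (pairs.map (·.1)) := by
    have := PySem.Dict.keys_foldl_modify_key pairs (·.1) []
      (fun _ q => (· ++ [q.2])) PySem.Dict.empty
    simpa [PySem.Dict.keys_empty, PySem.List.dedup_eq_ofList] using this
  rw [hkeys]
  apply List.map_congr_left
  intro cat _
  have := PySem.Dict.getD_foldl_modify_append pairs PySem.Dict.empty cat
  simp only [PySem.Dict.getD_empty, List.nil_append] at this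
  simp [this]
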